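-- pv_equiv track=rewrite | github.com/neil-marcellini/ml-wind-estimator | net.py | fake_wind_data
-- ===== SOURCE A (Python) =====
-- def fake_wind_data(points):
--     # oscillate 5 degrees every size seconds
--     size = 60
--     counter = 1
--     alternator = 1
--     wind_dir = 255
--     wind_estimates = []
--     for point in points:
--         if counter == size:
--             counter = 1
--             shift = 5 * alternator
--             wind_dir += shift
--             alternator *= -1
--         wind_estimates.append(wind_dir)
--         counter += 1
--     return wind_estimates
-- ===== SOURCE B (Python) =====
-- def fake_wind_data(points):
--     # closed form: the 5-degree shift toggles at point indices 59, 118, ... so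
--     # the value at index i depends only on the parity of i // 59
--     return [260 if (i // 59) % 2 == 1 else 255 for i, _ in enumerate(points)]
-- ===== Notes on version B (the rewrite author's own statement) =====
-- stated objective: simpler
-- what changed: Replaced the stateful counter/alternator/wind_dir loop with a positional closed form: the value at point index i is 260 iff floor(i/59) is odd, emitted by a single enumerate-based comprehension.
import Mathlib
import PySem

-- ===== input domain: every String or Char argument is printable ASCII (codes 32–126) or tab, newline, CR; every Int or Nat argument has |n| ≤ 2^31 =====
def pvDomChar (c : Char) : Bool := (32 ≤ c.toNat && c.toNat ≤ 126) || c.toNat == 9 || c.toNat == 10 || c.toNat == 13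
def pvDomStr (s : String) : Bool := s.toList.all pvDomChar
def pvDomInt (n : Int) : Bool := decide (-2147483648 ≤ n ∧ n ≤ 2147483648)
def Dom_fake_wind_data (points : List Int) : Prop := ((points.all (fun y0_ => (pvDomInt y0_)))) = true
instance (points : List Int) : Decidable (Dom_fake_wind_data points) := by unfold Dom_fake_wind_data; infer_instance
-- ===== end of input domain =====

-- B replaces A's stateful counter/alternator loop by a positional closed form
-- (value at index i is 260 iff (i // 59) is odd); objective: simpler.

-- ===== PORT A =====
-- literal port of A's loop: state (counter, alternator, wind_dir, accumulated list)
def fwGoA : List Int → Int → Int → Int → List Int → List Int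
  | [], _, _, _, acc => acc
  | _ :: ps, counter, alternator, wind_dir, acc =>
    if counter == 60 then
      -- counter = 1; shift = 5*alternator; wind_dir += shift; alternator *= -1;
      -- append; counter += 1
      fwGoA ps (1 + 1) (alternator * (-1)) (wind_dir + 5 * alternator)
        (acc ++ [wind_dir + 5 * alternator])
    else
      fwGoA ps (counter + 1) alternator wind_dir (acc ++ [wind_dir])

def fake_wind_data (points : List Int) : List Int :=
  fwGoA points 1 1 255 []

-- ===== PORT B =====
def fake_wind_data_alt (points : List Int) : List Int :=
  (PySem.List.enumerate points).map
    (fun ip => if PySem.Int.mod (PySem.Int.floordiv ip.1 59) 2 == 1 then (260 : Int) else 255)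

-- ===== PRECONDITION & SPEC =====
def Spec_fake_wind_data (points : List Int) (out : List Int) : Prop := out = fake_wind_data_alt points
instance (points : List Int) (out : List Int) : Decidable (Spec_fake_wind_data points out) := by unfold Spec_fake_wind_data; infer_instance

-- ===== CLAIM (what is proved, stated in full; the proofs are below) =====
def Claim_equal_fake_wind_data : Prop := ∀ (points : List Int), Dom_fake_wind_data points → Spec_fake_wind_data points (fake_wind_data points)

-- ===== LEMMAS AND PROOFS =====

-- proof-side canonical description: value emitted at absolute index n
def fwVal (n : Nat) : Int := if (n / 59) % 2 = 1 then 260 else 255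
-- number of shifts performed during the first n iterations
def fwFlips (n : Nat) : Nat := (n - 1) / 59
def fwCounter (n : Nat) : Int := (n : Int) + 1 - 59 * (fwFlips n : Int)
def fwAlt (n : Nat) : Int := if fwFlips n % 2 = 1 then -1 else 1
def fwDir (n : Nat) : Int := if fwFlips n % 2 = 1 then 260 else 255

theorem range_map_succ (l n : Nat) :
    (List.range (l + 1)).map (fun j => fwVal (n + j))
      = fwVal n :: (List.range l).map (fun j => fwVal (n + 1 + j)) := by
  rw [List.range_succ_eq_map, List.map_cons, List.map_map]
  refine congrArg₂ _ (by simp) ?_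
  apply List.map_congr_left; intro j _
  simp only [Function.comp]; congr 1; omega

theorem headVal (n : Nat) :
    (if PySem.Int.mod (PySem.Int.floordiv (n : Int) 59) 2 == 1 then (260 : Int) else 255)
      = fwVal n := by
  have e1 : PySem.Int.floordiv (n : Int) 59 = ((n / 59 : Nat) : Int) := by
    exact_mod_cast PySem.Int.floordiv_natCast n 59
  have e2 : PySem.Int.mod ((n / 59 : Nat) : Int) 2 = ((n / 59 % 2 : Nat) : Int) := by
    exact_mod_cast PySem.Int.mod_natCast (n / 59) 2
  rw [e1, e2]
  unfold fwVal
  rcases Nat.mod_two_eq_zero_or_one (n / 59) with h | h <;> simp [h]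

theorem fwGoA_spec : ∀ (ps : List Int) (n : Nat) (acc : List Int),
    fwGoA ps (fwCounter n) (fwAlt n) (fwDir n) acc
      = acc ++ (List.range ps.length).map (fun j => fwVal (n + j)) := by
  intro ps
  induction ps with
  | nil => intro n acc; simp [fwGoA]
  | cons p ps ih =>
    intro n acc
    by_cases h : n % 59 = 0 ∧ n ≠ 0
    · -- shift branch: counter = 60
      have hf : fwFlips n = n / 59 - 1 := by unfold fwFlips; omega
      have hf1 : fwFlips (n + 1) = n / 59 := by unfold fwFlips; omega
      have hc : fwCounter n = 60 := by unfold fwCounter; rw [hf]; omega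
      have hcond : (fwCounter n == (60 : Int)) = true := by rw [hc]; rfl
      have hdir : fwDir n + 5 * fwAlt n = fwDir (n + 1) := by
        unfold fwDir fwAlt; rw [hf, hf1]
        by_cases hp : n / 59 % 2 = 1
        · rw [if_neg (by omega), if_neg (by omega), if_pos hp]; ring
        · rw [if_pos (by omega), if_pos (by omega), if_neg hp]; ring
      have halt : fwAlt n * (-1) = fwAlt (n + 1) := by
        unfold fwAlt; rw [hf, hf1]
        by_cases hp : n / 59 % 2 = 1
        · rw [if_neg (by omega), if_pos hp]; ring
        · rw [if_pos (by omega), if_neg hp]; ring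
      have hctr : (1 + 1 : Int) = fwCounter (n + 1) := by unfold fwCounter; rw [hf1]; omega
      have hval : fwDir (n + 1) = fwVal n := by unfold fwDir fwVal; rw [hf1]
      rw [fwGoA, if_pos hcond, hdir, halt, hctr, ih (n + 1),
        List.length_cons, range_map_succ, hval]
      simp
    · -- no shift: counter ≠ 60
      have hf1 : fwFlips (n + 1) = fwFlips n := by unfold fwFlips; omega
      have hcond : (fwCounter n == (60 : Int)) = false := by
        simp only [beq_eq_false_iff_ne]; unfold fwCounter fwFlips; omega
      have hctr : fwCounter n + 1 = fwCounter (n + 1) := by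
        unfold fwCounter; rw [hf1]; push_cast; ring
      have hval : fwDir n = fwVal n := by
        unfold fwDir fwVal fwFlips
        have : (n - 1) / 59 % 2 = n / 59 % 2 := by omega
        rw [this]
      rw [fwGoA, if_neg (by simp [hcond]), hctr,
        show fwAlt n = fwAlt (n + 1) by unfold fwAlt; rw [hf1],
        show fwDir n = fwDir (n + 1) by unfold fwDir; rw [hf1],
        ih (n + 1), List.length_cons, range_map_succ,
        show fwDir (n + 1) = fwVal n by rw [show fwDir (n + 1) = fwDir n by unfold fwDir; rw [hf1], hval]]
      simp

theorem alt_spec : ∀ (ps : List Int) (n : Nat),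
    (PySem.List.enumerate ps (n : Int)).map
        (fun ip => if PySem.Int.mod (PySem.Int.floordiv ip.1 59) 2 == 1 then (260 : Int) else 255)
      = (List.range ps.length).map (fun j => fwVal (n + j)) := by
  intro ps
  induction ps with
  | nil => intro n; simp [PySem.List.enumerate_nil]
  | cons p ps ih =>
    intro n
    rw [PySem.List.enumerate_cons, List.map_cons, List.length_cons,
      show ((n : Int) + 1) = ((n + 1 : Nat) : Int) by push_cast; ring,
      ih (n + 1), range_map_succ]
    exact congrArg₂ _ (headVal n) rfl

-- ===== VERDICT (by name: the statement is the Claim_ definition above) =====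
theorem fake_wind_data_spec : Claim_equal_fake_wind_data := by
  intro points _
  unfold Spec_fake_wind_data fake_wind_data fake_wind_data_alt
  have h0 : fwCounter 0 = 1 := by decide
  have h1 : fwAlt 0 = 1 := by decide
  have h2 : fwDir 0 = 255 := by decide
  have hstart : fwGoA points 1 1 255 [] = fwGoA points (fwCounter 0) (fwAlt 0) (fwDir 0) [] := by
    rw [h0, h1, h2]
  rw [hstart, fwGoA_spec points 0 []]
  have h := alt_spec points 0
  simp only [Nat.cast_zero] at h
  simpa using h.symm
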